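-- pv_equiv track=rewrite | github.com/PoilenkovaAnna/BCI_SVM | data_preparation/selection_and_segmentation.py | get_two_segments_by_labels
-- ===== SOURCE A (Python) =====
-- def get_two_segments_by_labels(segments, labels, label0 = 1, label1 = 2):
--     segments_by_label0 = [[] for i in range(len(segments))]
--     segments_by_label1 = [[] for i in range(len(segments))]
--
--     for i_channel, channel in enumerate(segments):
--         for i_segment, (segment, l) in enumerate(zip(channel, labels)):
--             if l == label0:
--                 segments_by_label0[i_channel].append(segments[i_channel][i_segment])
--
--             if l == label1:
--                 segments_by_label1[i_channel].append(segments[i_channel][i_segment])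
--
--     return (segments_by_label0, [0]*len(segments_by_label0[0])), (segments_by_label1, [1]*len(segments_by_label1[0]))
-- ===== SOURCE B (Python) =====
-- def get_two_segments_by_labels(segments, labels, label0=1, label1=2):
--     idx0 = [i for i, l in enumerate(labels) if l == label0]
--     idx1 = [i for i, l in enumerate(labels) if l == label1]
--     seg0 = [[ch[i] for i in idx0 if i < len(ch)] for ch in segments]
--     seg1 = [[ch[i] for i in idx1 if i < len(ch)] for ch in segments]
--     return (seg0, [0] * len(seg0[0])), (seg1, [1] * len(seg1[0]))
-- ===== Notes on version B (the rewrite author's own statement) =====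
-- stated objective: alternative
-- what changed: B precomputes the index lists of positions whose label matches label0/label1 once, then gathers each channel's segments by those indices (bounded per channel to mirror zip truncation), instead of A's nested per-channel loop that re-tests every label and appends into preallocated lists.
import Mathlib
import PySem

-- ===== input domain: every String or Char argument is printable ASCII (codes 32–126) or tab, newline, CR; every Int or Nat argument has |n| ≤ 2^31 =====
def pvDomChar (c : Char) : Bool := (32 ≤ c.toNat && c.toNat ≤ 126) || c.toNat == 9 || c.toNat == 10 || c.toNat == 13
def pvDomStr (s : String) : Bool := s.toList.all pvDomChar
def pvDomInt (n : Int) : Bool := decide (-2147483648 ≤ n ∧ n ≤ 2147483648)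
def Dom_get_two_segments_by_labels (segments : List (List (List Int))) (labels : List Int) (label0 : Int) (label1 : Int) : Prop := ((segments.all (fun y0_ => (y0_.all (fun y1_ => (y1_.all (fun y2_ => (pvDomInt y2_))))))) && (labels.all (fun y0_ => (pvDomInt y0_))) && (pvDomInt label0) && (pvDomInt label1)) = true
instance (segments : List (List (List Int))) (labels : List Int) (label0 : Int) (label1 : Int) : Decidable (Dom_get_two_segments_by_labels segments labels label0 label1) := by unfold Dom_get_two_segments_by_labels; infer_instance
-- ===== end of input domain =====

-- B replaces A's nested per-channel label-testing loop by index lists (positions whose label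
-- matches) computed once and then gathered from each channel (objective: alternative decomposition).

-- ===== PORT A =====
-- inner loop body of A: 'for i_segment, (segment, l) in enumerate(zip(channel, labels)): …'
def pvAInnerBody (segments : List (List (List Int))) (label0 label1 : Int) (i_channel : Int)
    (st : List (List (List Int)) × List (List (List Int))) (q : Int × (List Int × Int)) :
    List (List (List Int)) × List (List (List Int)) :=
  let st0 := if q.2.2 == label0
    then (st.1.set i_channel.toNat (PySem.List.pyGetD st.1 i_channel [] ++ [PySem.List.pyGetD (PySem.List.pyGetD segments i_channel []) q.1 []]), st.2)
    else st
  if q.2.2 == label1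
    then (st0.1, st0.2.set i_channel.toNat (PySem.List.pyGetD st0.2 i_channel [] ++ [PySem.List.pyGetD (PySem.List.pyGetD segments i_channel []) q.1 []]))
    else st0

-- outer loop body of A: 'for i_channel, channel in enumerate(segments): …'
def pvABody (segments : List (List (List Int))) (labels : List Int) (label0 label1 : Int)
    (st : List (List (List Int)) × List (List (List Int))) (p : Int × List (List Int)) :
    List (List (List Int)) × List (List (List Int)) :=
  (PySem.List.enumerate (p.2.zip labels) 0).foldl (pvAInnerBody segments label0 label1 p.1) st

def get_two_segments_by_labels (segments : List (List (List Int))) (labels : List Int) (label0 : Int) (label1 : Int) : (List (List (List Int)) × List Int) × (List (List (List Int)) × List Int) :=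
  let st := (PySem.List.enumerate segments 0).foldl (pvABody segments labels label0 label1)
      (List.replicate segments.length [], List.replicate segments.length [])
  ((st.1, List.replicate (PySem.List.pyGetD st.1 0 []).length (0:Int)),
   (st.2, List.replicate (PySem.List.pyGetD st.2 0 []).length (1:Int)))

-- ===== PORT B =====
-- '[ch[i] for i in idx if i < len(ch)]'
def pvGather (idx : List Int) (ch : List (List Int)) : List (List Int) :=
  idx.filterMap (fun i => if i < (ch.length : Int) then some (PySem.List.pyGetD ch i []) else none)

def get_two_segments_by_labels_alt (segments : List (List (List Int))) (labels : List Int) (label0 : Int) (label1 : Int) : (List (List (List Int)) × List Int) × (List (List (List Int)) × List Int) :=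
  let idx0 := (PySem.List.enumerate labels 0).filterMap (fun p => if p.2 == label0 then some p.1 else none)
  let idx1 := (PySem.List.enumerate labels 0).filterMap (fun p => if p.2 == label1 then some p.1 else none)
  let seg0 := segments.map (pvGather idx0)
  let seg1 := segments.map (pvGather idx1)
  ((seg0, List.replicate (PySem.List.pyGetD seg0 0 []).length (0:Int)),
   (seg1, List.replicate (PySem.List.pyGetD seg1 0 []).length (1:Int)))

-- ===== PRECONDITION & SPEC =====
-- Pre_ excludes only segments = [], where Python A raises IndexError on segments_by_label0[0].
def Pre_get_two_segments_by_labels (segments : List (List (List Int))) (labels : List Int) (label0 : Int) (label1 : Int) : Prop := segments ≠ []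
instance (segments : List (List (List Int))) (labels : List Int) (label0 : Int) (label1 : Int) : Decidable (Pre_get_two_segments_by_labels segments labels label0 label1) := by unfold Pre_get_two_segments_by_labels; infer_instance
def pvWitness_get_two_segments_by_labels : List (List (List Int)) × List Int × Int × Int := ([[[3], [4], [5]], [[6], [7]]], [1, 2, 1], 1, 2)

def Spec_get_two_segments_by_labels (segments : List (List (List Int))) (labels : List Int) (label0 : Int) (label1 : Int) (out : (List (List (List Int)) × List Int) × (List (List (List Int)) × List Int)) : Prop := out = get_two_segments_by_labels_alt segments labels label0 label1
instance (segments : List (List (List Int))) (labels : List Int) (label0 : Int) (label1 : Int) (out : (List (List (List Int)) × List Int) × (List (List (List Int)) × List Int)) : Decidable (Spec_get_two_segments_by_labels segments labels label0 label1 out) := by unfold Spec_get_two_segments_by_labels; infer_instance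

-- ===== CLAIM (what is proved, stated in full; the proofs are below) =====
def Claim_equal_get_two_segments_by_labels : Prop := ∀ (segments : List (List (List Int))) (labels : List Int) (label0 : Int) (label1 : Int), Dom_get_two_segments_by_labels segments labels label0 label1 → Pre_get_two_segments_by_labels segments labels label0 label1 → Spec_get_two_segments_by_labels segments labels label0 label1 (get_two_segments_by_labels segments labels label0 label1)

-- ===== LEMMAS AND PROOFS =====

-- the per-channel list both programs compute for one label
def pvGz (lab : Int) (zl : List (List Int × Int)) : List (List Int) :=
  zl.filterMap (fun q => if q.2 == lab then some q.1 else none)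

-- B side: gathering a channel by the precomputed indices equals filtering the zipped channel
theorem pvB_channel_aux (lab : Int) (labels : List Int) :
    ∀ (s : Nat) (ch : List (List Int)),
      (PySem.List.enumerate labels (s : Int)).filterMap
        (fun p => if p.2 == lab then (if p.1 < (ch.length : Int) then some (PySem.List.pyGetD ch p.1 []) else none) else none)
      = pvGz lab ((ch.drop s).zip labels) := by
  induction labels with
  | nil => intro s ch; simp [PySem.List.enumerate_nil, pvGz]
  | cons l ls ih =>
    intro s ch
    rw [PySem.List.enumerate_cons]
    have hcast : ((s : Int) + 1) = ((s + 1 : Nat) : Int) := by push_cast; ring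
    by_cases hs : s < ch.length
    · obtain ⟨c, rest, hdrop⟩ : ∃ c rest, ch.drop s = c :: rest := by
        cases h : ch.drop s with
        | nil => exact absurd (List.drop_eq_nil_iff.mp h) (by omega)
        | cons c rest => exact ⟨c, rest, rfl⟩
      have hrest : ch.drop (s + 1) = rest := by
        have h3 : ch.drop (s + 1) = (ch.drop s).drop 1 := by rw [List.drop_drop]
        rw [h3, hdrop]; rfl
      have hc : PySem.List.pyGetD ch (s : Int) [] = c := by
        rw [PySem.List.pyGetD_natCast]
        have h2 : (ch.drop s)[0]? = ch[s + 0]? := List.getElem?_drop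
        rw [hdrop] at h2
        simp only [List.getElem?_cons_zero, Nat.add_zero] at h2
        simp [List.getD_eq_getElem?_getD, ← h2]
      have ihs := ih (s + 1) ch
      rw [hrest] at ihs
      simp only [List.filterMap_cons, hdrop, pvGz, List.zip_cons_cons]
      by_cases hl : l == lab
      · simp only [hl, if_pos]
        rw [if_pos (by exact_mod_cast hs), hc]
        simp only [List.filterMap_cons, hl, if_pos]
        rw [hcast, ihs]; rfl
      · simp only [hl, Bool.false_eq_true, if_false]
        rw [hcast, ihs]
        simp [pvGz, List.filterMap_cons, hl]
    · have hdrop : ch.drop s = [] := List.drop_eq_nil_iff.mpr (by omega)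
      have hrest : ch.drop (s + 1) = [] := List.drop_eq_nil_iff.mpr (by omega)
      have ihs := ih (s + 1) ch
      rw [hrest] at ihs
      have hslt : ¬ ((s : Int) < (ch.length : Int)) := by exact_mod_cast hs
      simp only [List.filterMap_cons, hdrop, List.zip_nil_left]
      rw [hcast]
      simp [hslt, ihs, pvGz]
      intro a b hmem _
      rw [PySem.List.mem_enumerate_iff] at hmem
      obtain ⟨k, hk, hp⟩ := hmem
      have ha : a = (s : Int) + 1 + (k : Int) := congrArg Prod.fst hp
      rw [ha]; omega

theorem pvB_channel (label0 : Int) (labels : List Int) (ch : List (List Int)) :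
    pvGather ((PySem.List.enumerate labels 0).filterMap (fun p => if p.2 == label0 then some p.1 else none)) ch
      = pvGz label0 (ch.zip labels) := by
  unfold pvGather
  rw [List.filterMap_filterMap]
  have h := pvB_channel_aux label0 labels 0 ch
  simp only [List.drop_zero, Nat.cast_zero] at h
  rw [← h]
  congr 1
  funext p
  by_cases hp : p.2 == label0 <;> simp [hp]

-- clean inner body (index fixed, element-only)
def pvClean (label0 label1 : Int) (i : Nat)
    (st : List (List (List Int)) × List (List (List Int))) (q : List Int × Int) :
    List (List (List Int)) × List (List (List Int)) :=
  let st0 := if q.2 == label0 then (st.1.set i (st.1.getD i [] ++ [q.1]), st.2) else st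
  if q.2 == label1 then (st0.1, st0.2.set i (st0.2.getD i [] ++ [q.1])) else st0

theorem pv_foldl_enum_snd {σ β : Type} (zl : List β) (C : σ → β → σ) :
    ∀ (s : Int) (init : σ), (PySem.List.enumerate zl s).foldl (fun st q => C st q.2) init = zl.foldl C init := by
  induction zl with
  | nil => intro s init; simp [PySem.List.enumerate_nil]
  | cons x xs ih => intro s init; simp [PySem.List.enumerate_cons, List.foldl_cons, ih]

theorem pv_getD_append_cons (pre rest : List (List (List Int))) (x d : List (List Int)) :
    (pre ++ x :: rest).getD pre.length d = x := by
  simp [List.getD_eq_getElem?_getD, List.getElem?_append_right (Nat.le_refl _)]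

theorem pv_set_append_cons (pre rest : List (List (List Int))) (x v : List (List Int)) :
    (pre ++ x :: rest).set pre.length v = pre ++ v :: rest := by
  induction pre with
  | nil => simp
  | cons h t ih => simp [List.set_cons_succ, ih]

theorem pv_set_getD_set (s0 : List (List (List Int))) (i : Nat) (h : i < s0.length) (v g : List (List Int)) :
    (s0.set i v).set i ((s0.set i v).getD i [] ++ g) = s0.set i (v ++ g) := by
  have hg : (s0.set i v).getD i [] = v := by
    simp [List.getD_eq_getElem?_getD, List.getElem?_set_self, h]
  rw [hg, List.set_set]

theorem pv_comp (s0 : List (List (List Int))) (i : Nat) (h : i < s0.length) (b : Bool)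
    (x : List Int) (g : List (List Int)) :
    (if b then s0.set i (s0.getD i [] ++ [x]) else s0).set i
      ((if b then s0.set i (s0.getD i [] ++ [x]) else s0).getD i [] ++ g)
    = s0.set i (s0.getD i [] ++ (if b then x :: g else g)) := by
  cases b
  · simp
  · simp only [if_pos]
    rw [pv_set_getD_set s0 i h]
    simp

theorem pv_inner_clean (label0 label1 : Int) :
    ∀ (zl : List (List Int × Int)) (i : Nat) (s0 s1 : List (List (List Int))),
      i < s0.length → i < s1.length →
      zl.foldl (pvClean label0 label1 i) (s0, s1)
        = (s0.set i (s0.getD i [] ++ pvGz label0 zl), s1.set i (s1.getD i [] ++ pvGz label1 zl)) := by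
  intro zl
  induction zl with
  | nil =>
    intro i s0 s1 h0 h1
    simp [pvGz, List.getD_eq_getElem?_getD, List.getElem?_eq_getElem h0, List.getElem?_eq_getElem h1]
  | cons q rest ih =>
    intro i s0 s1 h0 h1
    simp only [List.foldl_cons]
    have hstep : pvClean label0 label1 i (s0, s1) q
        = ((if q.2 == label0 then s0.set i (s0.getD i [] ++ [q.1]) else s0),
           (if q.2 == label1 then s1.set i (s1.getD i [] ++ [q.1]) else s1)) := by
      unfold pvClean
      by_cases ha : q.2 == label0 <;> by_cases hb : q.2 == label1 <;> simp [ha, hb]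
    rw [hstep, ih i _ _
      (by by_cases ha : (q.2 == label0) = true <;> simp [ha, h0])
      (by by_cases hb : (q.2 == label1) = true <;> simp [hb, h1])]
    rw [pv_comp s0 i h0 (q.2 == label0) q.1 (pvGz label0 rest),
        pv_comp s1 i h1 (q.2 == label1) q.1 (pvGz label1 rest)]
    by_cases ha : q.2 = label0 <;> by_cases hb : q.2 = label1 <;>
      simp [pvGz, List.filterMap_cons, ha, hb] <;> split <;> simp_all

set_option maxRecDepth 8192 in
theorem pv_outer (segments : List (List (List Int))) (labels : List Int) (label0 label1 : Int) :
    ∀ (tail : List (List (List Int))) (s : Nat) (pre0 pre1 : List (List (List Int))),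
      segments.drop s = tail → pre0.length = s → pre1.length = s →
      (PySem.List.enumerate tail (s : Int)).foldl (pvABody segments labels label0 label1)
        (pre0 ++ List.replicate tail.length [], pre1 ++ List.replicate tail.length [])
      = (pre0 ++ tail.map (fun ch => pvGz label0 (ch.zip labels)),
         pre1 ++ tail.map (fun ch => pvGz label1 (ch.zip labels))) := by
  intro tail
  induction tail with
  | nil => intro s pre0 pre1 _ _ _; simp [PySem.List.enumerate_nil]
  | cons ch rest ih =>
    intro s pre0 pre1 hdrop hl0 hl1
    have hch : PySem.List.pyGetD segments (s : Int) [] = ch := by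
      rw [PySem.List.pyGetD_natCast]
      have h2 : (segments.drop s)[0]? = segments[s + 0]? := List.getElem?_drop
      rw [hdrop] at h2
      simp only [List.getElem?_cons_zero, Nat.add_zero] at h2
      simp [List.getD_eq_getElem?_getD, ← h2]
    have hrest : segments.drop (s + 1) = rest := by
      have h3 : segments.drop (s + 1) = (segments.drop s).drop 1 := by rw [List.drop_drop]
      rw [h3, hdrop]; rfl
    rw [PySem.List.enumerate_cons, List.foldl_cons]
    have hlen0 : s < (pre0 ++ List.replicate (ch :: rest).length ([] : List (List Int))).length := by
      simp [hl0]
    have hlen1 : s < (pre1 ++ List.replicate (ch :: rest).length ([] : List (List Int))).length := by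
      simp [hl1]
    have hstep : pvABody segments labels label0 label1
        (pre0 ++ List.replicate (ch :: rest).length [], pre1 ++ List.replicate (ch :: rest).length [])
        ((s : Int), ch)
        = ((pre0 ++ [pvGz label0 (ch.zip labels)]) ++ List.replicate rest.length [],
           (pre1 ++ [pvGz label1 (ch.zip labels)]) ++ List.replicate rest.length []) := by
      have hcongr : ∀ (acc : List (List (List Int)) × List (List (List Int)))
          (q : Int × (List Int × Int)), q ∈ PySem.List.enumerate (ch.zip labels) 0 →
          pvAInnerBody segments label0 label1 (s : Int) acc q = pvClean label0 label1 s acc q.2 := by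
        intro acc q hq
        rw [PySem.List.mem_enumerate_iff] at hq
        obtain ⟨k, hk, rfl⟩ := hq
        have hkc : k < ch.length := by
          have := hk; rw [List.length_zip] at this; omega
        have hv : PySem.List.pyGetD ch ((0 : Int) + (k : Nat)) [] = ((ch.zip labels)[k]).1 := by
          rw [zero_add, PySem.List.pyGetD_natCast]
          simp [List.getD_eq_getElem?_getD, List.getElem?_eq_getElem hkc, List.getElem_zip]
        simp only [pvAInnerBody, pvClean, hch, hv, PySem.List.pyGetD_natCast, Int.toNat_natCast]
      show (PySem.List.enumerate (ch.zip labels) 0).foldl (pvAInnerBody segments label0 label1 (s : Int))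
          (pre0 ++ List.replicate (ch :: rest).length [], pre1 ++ List.replicate (ch :: rest).length [])
        = ((pre0 ++ [pvGz label0 (ch.zip labels)]) ++ List.replicate rest.length [],
           (pre1 ++ [pvGz label1 (ch.zip labels)]) ++ List.replicate rest.length [])
      rw [PySem.List.foldl_congr_mem _ _ (fun st (q : Int × (List Int × Int)) => pvClean label0 label1 s st q.2) _ hcongr, pv_foldl_enum_snd, pv_inner_clean label0 label1 _ s _ _ hlen0 hlen1]
      simp only [List.length_cons, List.replicate_succ]
      rw [show s = pre0.length from hl0.symm, pv_getD_append_cons, pv_set_append_cons]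
      rw [show pre0.length = pre1.length from hl0 ▸ hl1.symm, pv_getD_append_cons, pv_set_append_cons]
      rw [List.nil_append, List.nil_append, List.append_assoc, List.append_assoc, List.singleton_append, List.singleton_append]
    rw [hstep]
    have hcast : ((s : Int) + 1) = ((s + 1 : Nat) : Int) := by push_cast; ring
    rw [hcast, ih (s + 1) (pre0 ++ [pvGz label0 (ch.zip labels)]) (pre1 ++ [pvGz label1 (ch.zip labels)])
      hrest (by simp [hl0]) (by simp [hl1])]
    simp

-- ===== VERDICT (by name: the statement is the Claim_ definition above) =====
theorem get_two_segments_by_labels_spec : Claim_equal_get_two_segments_by_labels := by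
  intro segments labels label0 label1 _ _
  unfold Spec_get_two_segments_by_labels
  unfold get_two_segments_by_labels get_two_segments_by_labels_alt
  have houter := pv_outer segments labels label0 label1 segments 0 [] [] (by simp) rfl rfl
  simp only [Nat.cast_zero, List.nil_append, List.drop_zero] at houter
  have hB0 : segments.map (pvGather ((PySem.List.enumerate labels 0).filterMap (fun p => if p.2 == label0 then some p.1 else none)))
      = segments.map (fun ch => pvGz label0 (ch.zip labels)) :=
    List.map_congr_left (fun ch _ => pvB_channel label0 labels ch)
  have hB1 : segments.map (pvGather ((PySem.List.enumerate labels 0).filterMap (fun p => if p.2 == label1 then some p.1 else none)))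
      = segments.map (fun ch => pvGz label1 (ch.zip labels)) :=
    List.map_congr_left (fun ch _ => pvB_channel label1 labels ch)
  simp only [houter, hB0, hB1]
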